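-- pv_equiv track=rewrite | github.com/alicangnll/TurboTuning | turboquant/layer_profiler.py | _build_per_layer_json
-- ===== SOURCE A (Python) =====
-- from typing import Dict, List, Optional, Tuple
--
-- def _build_per_layer_json(mode: int, n_layers: int,
--                           base_k: str = "turbo4",
--                           base_v: str = "turbo2") -> Dict:
--     """Mirror the C++ logic for each mode and return a layer-config dict."""
--     k_types: List[str] = []
--     v_types: List[str] = []
--
--     for il in range(n_layers):
--         lk, lv = base_k, base_v
--
--         if mode == 1 and n_layers >= 8:
--             if il < 4 or il >= n_layers - 4:
--                 lk, lv = "q8_0", "q8_0"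
--
--         elif mode == 2 and n_layers >= 8:
--             if il >= n_layers - 8:
--                 lk, lv = "q8_0", "q8_0"
--
--         elif mode == 5 and n_layers >= 8:
--             is_boundary = (il < 2 or il >= n_layers - 2)
--             lv = "turbo4" if is_boundary else "turbo2"
--
--         elif mode == 6 and n_layers >= 8:
--             lv = "turbo4" if il >= n_layers - 8 else "turbo2"
--
--         elif mode == 7 and n_layers >= 8:
--             is_boundary = (il < 2 or il >= n_layers - 2)
--             lv = "q8_0" if is_boundary else "turbo2"
--
--         k_types.append(lk)
--         v_types.append(lv)
--
--     return {"k": k_types, "v": v_types}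
-- ===== SOURCE B (Python) =====
-- def _build_per_layer_json(mode: int, n_layers: int,
--                           base_k: str = "turbo4",
--                           base_v: str = "turbo2"):
--     n = n_layers
--     k = [base_k] * n
--     v = [base_v] * n
--     if n >= 8:
--         if mode == 1:
--             q = ["q8_0"] * 4
--             k[:4] = q; k[n - 4:] = q
--             v[:4] = q; v[n - 4:] = q
--         elif mode == 2:
--             q = ["q8_0"] * 8
--             k[n - 8:] = q
--             v[n - 8:] = q
--         elif mode == 5:
--             v = ["turbo2"] * n
--             t = ["turbo4"] * 2
--             v[:2] = t; v[n - 2:] = t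
--         elif mode == 6:
--             v = ["turbo2"] * (n - 8) + ["turbo4"] * 8
--         elif mode == 7:
--             v = ["turbo2"] * n
--             t = ["q8_0"] * 2
--             v[:2] = t; v[n - 2:] = t
--     return {"k": k, "v": v}
-- ===== Notes on version B (the rewrite author's own statement) =====
-- stated objective: simpler
-- what changed: Replaces the per-index loop with per-mode conditional checks by bulk list initialization and a single branch on mode that overwrites boundary ranges via slice assignment.
import Mathlib
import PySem

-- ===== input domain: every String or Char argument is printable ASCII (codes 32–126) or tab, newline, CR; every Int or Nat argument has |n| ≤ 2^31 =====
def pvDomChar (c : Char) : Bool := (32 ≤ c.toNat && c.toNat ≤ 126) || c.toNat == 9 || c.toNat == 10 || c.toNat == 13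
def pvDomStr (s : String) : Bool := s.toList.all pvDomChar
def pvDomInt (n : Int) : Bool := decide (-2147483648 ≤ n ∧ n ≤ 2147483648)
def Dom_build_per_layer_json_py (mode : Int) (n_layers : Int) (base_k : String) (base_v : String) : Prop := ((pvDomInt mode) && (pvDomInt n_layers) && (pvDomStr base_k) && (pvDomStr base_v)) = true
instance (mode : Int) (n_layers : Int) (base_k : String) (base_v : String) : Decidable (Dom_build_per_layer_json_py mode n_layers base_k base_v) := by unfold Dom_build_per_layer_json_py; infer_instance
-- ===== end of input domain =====

-- B replaces A's per-index loop by bulk initialization plus one branch on mode that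
-- overwrites boundary ranges via slice assignment (objective: simpler).

-- ===== PORT A =====
-- loop body of A: computes (lk, lv) for layer index il
def pvLayerA (mode : Int) (n_layers : Int) (base_k : String) (base_v : String) (il : Int) : String × String :=
  if mode = 1 ∧ n_layers ≥ 8 then
    if il < 4 ∨ il ≥ n_layers - 4 then ("q8_0", "q8_0") else (base_k, base_v)
  else if mode = 2 ∧ n_layers ≥ 8 then
    if il ≥ n_layers - 8 then ("q8_0", "q8_0") else (base_k, base_v)
  else if mode = 5 ∧ n_layers ≥ 8 then
    (base_k, if il < 2 ∨ il ≥ n_layers - 2 then "turbo4" else "turbo2")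
  else if mode = 6 ∧ n_layers ≥ 8 then
    (base_k, if il ≥ n_layers - 8 then "turbo4" else "turbo2")
  else if mode = 7 ∧ n_layers ≥ 8 then
    (base_k, if il < 2 ∨ il ≥ n_layers - 2 then "q8_0" else "turbo2")
  else (base_k, base_v)

def build_per_layer_json_py (mode : Int) (n_layers : Int) (base_k : String) (base_v : String) : List (String × List String) :=
  let r := (PySem.List.pyRange 0 n_layers 1).foldl
    (fun acc il =>
      let p := pvLayerA mode n_layers base_k base_v il
      (acc.1 ++ [p.1], acc.2 ++ [p.2]))
    ([], [])
  [("k", r.1), ("v", r.2)]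

-- ===== PORT B =====
-- l[:b] = ys  (Python slice assignment; exact here since B only uses it with ys.length = b ≤ l.length)
def pvSetTo (l : List String) (b : Nat) (ys : List String) : List String := ys ++ l.drop b
-- l[a:] = ys  (exact here since B only uses it with a ≤ l.length)
def pvSetFrom (l : List String) (a : Nat) (ys : List String) : List String := l.take a ++ ys

def build_per_layer_json_py_alt (mode : Int) (n_layers : Int) (base_k : String) (base_v : String) : List (String × List String) :=
  let n := n_layers
  -- [x] * n is [] for n ≤ 0, hence n.toNat
  let k0 := List.replicate n.toNat base_k
  let v0 := List.replicate n.toNat base_v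
  if n ≥ 8 then
    if mode = 1 then
      let q := List.replicate 4 "q8_0"
      [("k", pvSetFrom (pvSetTo k0 4 q) (n - 4).toNat q),
       ("v", pvSetFrom (pvSetTo v0 4 q) (n - 4).toNat q)]
    else if mode = 2 then
      let q := List.replicate 8 "q8_0"
      [("k", pvSetFrom k0 (n - 8).toNat q), ("v", pvSetFrom v0 (n - 8).toNat q)]
    else if mode = 5 then
      let t := List.replicate 2 "turbo4"
      [("k", k0), ("v", pvSetFrom (pvSetTo (List.replicate n.toNat "turbo2") 2 t) (n - 2).toNat t)]
    else if mode = 6 then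
      [("k", k0), ("v", List.replicate (n - 8).toNat "turbo2" ++ List.replicate 8 "turbo4")]
    else if mode = 7 then
      let t := List.replicate 2 "q8_0"
      [("k", k0), ("v", pvSetFrom (pvSetTo (List.replicate n.toNat "turbo2") 2 t) (n - 2).toNat t)]
    else [("k", k0), ("v", v0)]
  else [("k", k0), ("v", v0)]

-- ===== PRECONDITION & SPEC =====
def Spec_build_per_layer_json_py (mode : Int) (n_layers : Int) (base_k : String) (base_v : String) (out : List (String × List String)) : Prop := out = build_per_layer_json_py_alt mode n_layers base_k base_v
instance (mode : Int) (n_layers : Int) (base_k : String) (base_v : String) (out : List (String × List String)) : Decidable (Spec_build_per_layer_json_py mode n_layers base_k base_v out) := by unfold Spec_build_per_layer_json_py; infer_instance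

-- ===== CLAIM (what is proved, stated in full; the proofs are below) =====
def Claim_equal_build_per_layer_json_py : Prop := ∀ (mode : Int) (n_layers : Int) (base_k : String) (base_v : String), Dom_build_per_layer_json_py mode n_layers base_k base_v → Spec_build_per_layer_json_py mode n_layers base_k base_v (build_per_layer_json_py mode n_layers base_k base_v)

-- ===== LEMMAS AND PROOFS =====

-- A's appending pair-fold is a pair of maps
theorem pv_foldpair (g : Int → String × String) (l : List Int) (k v : List String) :
    l.foldl (fun acc il => let p := g il; (acc.1 ++ [p.1], acc.2 ++ [p.2])) (k, v)
      = (k ++ l.map (fun il => (g il).1), v ++ l.map (fun il => (g il).2)) := by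
  induction l generalizing k v with
  | nil => simp
  | cons x t ih => simp [List.foldl_cons, ih]

theorem pv_map_range_const (a b : Int) (f : Int → String) (c : String)
    (h : ∀ x, a ≤ x → x < b → f x = c) :
    (PySem.List.pyRange a b 1).map f = List.replicate (b - a).toNat c := by
  have : ∀ l : List Int, (∀ x ∈ l, f x = c) → l.map f = List.replicate l.length c := by
    intro l
    induction l with
    | nil => simp
    | cons x t ih =>
      intro hl
      simp only [List.map_cons, List.length_cons, List.replicate_succ]
      exact congrArg₂ (· :: ·) (hl x (by simp)) (ih fun y hy => hl y (by simp [hy]))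
  rw [this _ (fun x hx => by rw [PySem.List.mem_pyRange_one] at hx; exact h x hx.1 hx.2),
      PySem.List.length_pyRange_one]

-- characterizations of A's loop body
theorem pvA_1t (n : Int) (bk bv : String) (x : Int) (hn : n ≥ 8) (hx : x < 4 ∨ x ≥ n - 4) :
    pvLayerA 1 n bk bv x = ("q8_0", "q8_0") := by
  simp only [pvLayerA]; rw [if_pos (by refine ⟨?_, hn⟩; norm_num), if_pos hx]

theorem pvA_1f (n : Int) (bk bv : String) (x : Int) (hn : n ≥ 8) (h1 : 4 ≤ x) (h2 : x < n - 4) :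
    pvLayerA 1 n bk bv x = (bk, bv) := by
  simp only [pvLayerA]; rw [if_pos (by refine ⟨?_, hn⟩; norm_num), if_neg (by omega)]

theorem pvA_2t (n : Int) (bk bv : String) (x : Int) (hn : n ≥ 8) (hx : x ≥ n - 8) :
    pvLayerA 2 n bk bv x = ("q8_0", "q8_0") := by
  simp only [pvLayerA]
  rw [if_neg (by rintro ⟨h, _⟩; exact absurd h (by norm_num)), if_pos (by refine ⟨?_, hn⟩; norm_num), if_pos hx]

theorem pvA_2f (n : Int) (bk bv : String) (x : Int) (hn : n ≥ 8) (hx : x < n - 8) :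
    pvLayerA 2 n bk bv x = (bk, bv) := by
  simp only [pvLayerA]
  rw [if_neg (by rintro ⟨h, _⟩; exact absurd h (by norm_num)), if_pos (by refine ⟨?_, hn⟩; norm_num), if_neg (by omega)]

theorem pvA_5 (n : Int) (bk bv : String) (x : Int) (hn : n ≥ 8) :
    pvLayerA 5 n bk bv x = (bk, if x < 2 ∨ x ≥ n - 2 then "turbo4" else "turbo2") := by
  simp only [pvLayerA]
  rw [if_neg (by rintro ⟨h, _⟩; exact absurd h (by norm_num)),
      if_neg (by rintro ⟨h, _⟩; exact absurd h (by norm_num)), if_pos (by refine ⟨?_, hn⟩; norm_num)]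

theorem pvA_6 (n : Int) (bk bv : String) (x : Int) (hn : n ≥ 8) :
    pvLayerA 6 n bk bv x = (bk, if x ≥ n - 8 then "turbo4" else "turbo2") := by
  simp only [pvLayerA]
  rw [if_neg (by rintro ⟨h, _⟩; exact absurd h (by norm_num)),
      if_neg (by rintro ⟨h, _⟩; exact absurd h (by norm_num)),
      if_neg (by rintro ⟨h, _⟩; exact absurd h (by norm_num)), if_pos (by refine ⟨?_, hn⟩; norm_num)]

theorem pvA_7 (n : Int) (bk bv : String) (x : Int) (hn : n ≥ 8) :
    pvLayerA 7 n bk bv x = (bk, if x < 2 ∨ x ≥ n - 2 then "q8_0" else "turbo2") := by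
  simp only [pvLayerA]
  rw [if_neg (by rintro ⟨h, _⟩; exact absurd h (by norm_num)),
      if_neg (by rintro ⟨h, _⟩; exact absurd h (by norm_num)),
      if_neg (by rintro ⟨h, _⟩; exact absurd h (by norm_num)),
      if_neg (by rintro ⟨h, _⟩; exact absurd h (by norm_num)), if_pos (by refine ⟨?_, hn⟩; norm_num)]

theorem pvA_def (mode n : Int) (bk bv : String) (x : Int)
    (h : n < 8 ∨ (mode ≠ 1 ∧ mode ≠ 2 ∧ mode ≠ 5 ∧ mode ≠ 6 ∧ mode ≠ 7)) :
    pvLayerA mode n bk bv x = (bk, bv) := by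
  simp only [pvLayerA]
  rw [if_neg (by rintro ⟨hm, hn'⟩; rcases h with h | h; exacts [absurd hn' (by omega), h.1 hm]),
      if_neg (by rintro ⟨hm, hn'⟩; rcases h with h | h; exacts [absurd hn' (by omega), h.2.1 hm]),
      if_neg (by rintro ⟨hm, hn'⟩; rcases h with h | h; exacts [absurd hn' (by omega), h.2.2.1 hm]),
      if_neg (by rintro ⟨hm, hn'⟩; rcases h with h | h; exacts [absurd hn' (by omega), h.2.2.2.1 hm]),
      if_neg (by rintro ⟨hm, hn'⟩; rcases h with h | h; exacts [absurd hn' (by omega), h.2.2.2.2 hm])]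

theorem pv_take_repl (s q : String) (n : Int) (hn : n ≥ 8) :
    (List.replicate 4 q ++ (List.replicate n.toNat s).drop 4).take (n - 4).toNat
      = List.replicate 4 q ++ List.replicate (n - 8).toNat s := by
  rw [List.drop_replicate, List.take_append, List.take_replicate, List.take_replicate]
  congr 2 <;> (try simp only [List.length_replicate]) <;> omega

theorem pv_take_repl2 (s q : String) (n : Int) (hn : n ≥ 8) :
    (List.replicate 2 q ++ (List.replicate n.toNat s).drop 2).take (n - 2).toNat
      = List.replicate 2 q ++ List.replicate (n - 4).toNat s := by
  rw [List.drop_replicate, List.take_append, List.take_replicate, List.take_replicate]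
  congr 2 <;> (try simp only [List.length_replicate]) <;> omega

-- ===== VERDICT (by name: the statement is the Claim_ definition above) =====
theorem build_per_layer_json_py_spec : Claim_equal_build_per_layer_json_py := by
  intro mode n base_k base_v _
  unfold Spec_build_per_layer_json_py build_per_layer_json_py build_per_layer_json_py_alt
  rw [pv_foldpair (pvLayerA mode n base_k base_v)]
  simp only [List.nil_append]
  by_cases hn : n ≥ 8
  case neg =>
    rw [pv_map_range_const 0 n _ base_k (fun x _ _ => by simp only [pvA_def mode n base_k base_v x (Or.inl (by omega))]),
        pv_map_range_const 0 n _ base_v (fun x _ _ => by simp only [pvA_def mode n base_k base_v x (Or.inl (by omega))]),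
        if_neg hn]
    norm_num
  case pos =>
    by_cases h1 : mode = 1
    · subst h1
      rw [PySem.List.pyRange_one_append 0 4 n (by omega) (by omega),
          PySem.List.pyRange_one_append 4 (n - 4) n (by omega) (by omega)]
      simp only [List.map_append]
      rw [pv_map_range_const 0 4 _ "q8_0" (fun x hx1 hx2 => by simp only [pvA_1t n base_k base_v x hn (by omega)]),
          pv_map_range_const 4 (n - 4) _ base_k (fun x hx1 hx2 => by simp only [pvA_1f n base_k base_v x hn hx1 hx2]),
          pv_map_range_const (n - 4) n _ "q8_0" (fun x hx1 hx2 => by simp only [pvA_1t n base_k base_v x hn (by omega)]),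
          pv_map_range_const 0 4 (fun il => (pvLayerA 1 n base_k base_v il).2) "q8_0"
            (fun x hx1 hx2 => by simp only [pvA_1t n base_k base_v x hn (by omega)]),
          pv_map_range_const 4 (n - 4) (fun il => (pvLayerA 1 n base_k base_v il).2) base_v
            (fun x hx1 hx2 => by simp only [pvA_1f n base_k base_v x hn hx1 hx2]),
          pv_map_range_const (n - 4) n (fun il => (pvLayerA 1 n base_k base_v il).2) "q8_0"
            (fun x hx1 hx2 => by simp only [pvA_1t n base_k base_v x hn (by omega)]),
          if_pos hn, if_pos (by norm_num)]
      simp only [pvSetTo, pvSetFrom]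
      rw [pv_take_repl base_k "q8_0" n hn, pv_take_repl base_v "q8_0" n hn]
      have h4 : ((4 : Int) - 0).toNat = 4 := by omega
      have hh : (n - (n - 4)).toNat = 4 := by omega
      have hm : (n - 4 - 4).toNat = (n - 8).toNat := by omega
      rw [h4, hh, hm]
      simp
    by_cases h2 : mode = 2
    · subst h2
      rw [PySem.List.pyRange_one_append 0 (n - 8) n (by omega) (by omega)]
      simp only [List.map_append]
      rw [pv_map_range_const 0 (n - 8) _ base_k (fun x hx1 hx2 => by simp only [pvA_2f n base_k base_v x hn hx2]),
          pv_map_range_const (n - 8) n _ "q8_0" (fun x hx1 hx2 => by simp only [pvA_2t n base_k base_v x hn hx1]),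
          pv_map_range_const 0 (n - 8) (fun il => (pvLayerA 2 n base_k base_v il).2) base_v
            (fun x hx1 hx2 => by simp only [pvA_2f n base_k base_v x hn hx2]),
          pv_map_range_const (n - 8) n (fun il => (pvLayerA 2 n base_k base_v il).2) "q8_0"
            (fun x hx1 hx2 => by simp only [pvA_2t n base_k base_v x hn hx1]),
          if_pos hn, if_neg h1, if_pos (by norm_num)]
      simp only [pvSetFrom]
      rw [List.take_replicate, List.take_replicate]
      have e0 : ((n : Int) - 8 - 0).toNat = (n - 8).toNat := by omega
      have e1 : min (n - 8).toNat n.toNat = (n - 8).toNat := by omega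
      have e2 : (n - (n - 8)).toNat = 8 := by omega
      rw [e0, e1, e2]
    by_cases h5 : mode = 5
    · subst h5
      rw [PySem.List.pyRange_one_append 0 2 n (by omega) (by omega),
          PySem.List.pyRange_one_append 2 (n - 2) n (by omega) (by omega)]
      simp only [List.map_append]
      rw [pv_map_range_const 0 2 (fun il => (pvLayerA 5 n base_k base_v il).2) "turbo4"
            (fun x hx1 hx2 => by simp only [pvA_5 n base_k base_v x hn]; rw [if_pos (by omega)]),
          pv_map_range_const 2 (n - 2) (fun il => (pvLayerA 5 n base_k base_v il).2) "turbo2"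
            (fun x hx1 hx2 => by simp only [pvA_5 n base_k base_v x hn]; rw [if_neg (by omega)]),
          pv_map_range_const (n - 2) n (fun il => (pvLayerA 5 n base_k base_v il).2) "turbo4"
            (fun x hx1 hx2 => by simp only [pvA_5 n base_k base_v x hn]; rw [if_pos (by omega)]),
          pv_map_range_const 0 2 (fun il => (pvLayerA 5 n base_k base_v il).1) base_k
            (fun x hx1 hx2 => by simp only [pvA_5 n base_k base_v x hn]),
          pv_map_range_const 2 (n - 2) (fun il => (pvLayerA 5 n base_k base_v il).1) base_k
            (fun x hx1 hx2 => by simp only [pvA_5 n base_k base_v x hn]),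
          pv_map_range_const (n - 2) n (fun il => (pvLayerA 5 n base_k base_v il).1) base_k
            (fun x hx1 hx2 => by simp only [pvA_5 n base_k base_v x hn]),
          if_pos hn, if_neg h1, if_neg h2, if_pos (by norm_num)]
      simp only [pvSetTo, pvSetFrom]
      rw [pv_take_repl2 "turbo2" "turbo4" n hn]
      have e0 : ((2 : Int) - 0).toNat = 2 := by omega
      have em : (n - 2 - 2).toNat = (n - 4).toNat := by omega
      have e1 : (n - (n - 2)).toNat = 2 := by omega
      have hk : List.replicate 2 base_k ++ (List.replicate (n - 4).toNat base_k ++ List.replicate 2 base_k)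
          = List.replicate n.toNat base_k := by
        rw [List.replicate_append_replicate, List.replicate_append_replicate]; congr 1; omega
      rw [e0, em, e1, hk]
      simp
    by_cases h6 : mode = 6
    · subst h6
      rw [PySem.List.pyRange_one_append 0 (n - 8) n (by omega) (by omega)]
      simp only [List.map_append]
      rw [pv_map_range_const 0 (n - 8) (fun il => (pvLayerA 6 n base_k base_v il).2) "turbo2"
            (fun x hx1 hx2 => by simp only [pvA_6 n base_k base_v x hn]; rw [if_neg (by omega)]),
          pv_map_range_const (n - 8) n (fun il => (pvLayerA 6 n base_k base_v il).2) "turbo4"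
            (fun x hx1 hx2 => by simp only [pvA_6 n base_k base_v x hn]; rw [if_pos (by omega)]),
          pv_map_range_const 0 (n - 8) (fun il => (pvLayerA 6 n base_k base_v il).1) base_k
            (fun x hx1 hx2 => by simp only [pvA_6 n base_k base_v x hn]),
          pv_map_range_const (n - 8) n (fun il => (pvLayerA 6 n base_k base_v il).1) base_k
            (fun x hx1 hx2 => by simp only [pvA_6 n base_k base_v x hn]),
          if_pos hn, if_neg h1, if_neg h2, if_neg h5, if_pos (by norm_num)]
      have e0 : ((n : Int) - 8 - 0).toNat = (n - 8).toNat := by omega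
      have e2 : (n - (n - 8)).toNat = 8 := by omega
      have hk : List.replicate (n - 8).toNat base_k ++ List.replicate 8 base_k
          = List.replicate n.toNat base_k := by
        rw [List.replicate_append_replicate]; congr 1; omega
      rw [e0, e2, hk]
    by_cases h7 : mode = 7
    · subst h7
      rw [PySem.List.pyRange_one_append 0 2 n (by omega) (by omega),
          PySem.List.pyRange_one_append 2 (n - 2) n (by omega) (by omega)]
      simp only [List.map_append]
      rw [pv_map_range_const 0 2 (fun il => (pvLayerA 7 n base_k base_v il).2) "q8_0"
            (fun x hx1 hx2 => by simp only [pvA_7 n base_k base_v x hn]; rw [if_pos (by omega)]),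
          pv_map_range_const 2 (n - 2) (fun il => (pvLayerA 7 n base_k base_v il).2) "turbo2"
            (fun x hx1 hx2 => by simp only [pvA_7 n base_k base_v x hn]; rw [if_neg (by omega)]),
          pv_map_range_const (n - 2) n (fun il => (pvLayerA 7 n base_k base_v il).2) "q8_0"
            (fun x hx1 hx2 => by simp only [pvA_7 n base_k base_v x hn]; rw [if_pos (by omega)]),
          pv_map_range_const 0 2 (fun il => (pvLayerA 7 n base_k base_v il).1) base_k
            (fun x hx1 hx2 => by simp only [pvA_7 n base_k base_v x hn]),
          pv_map_range_const 2 (n - 2) (fun il => (pvLayerA 7 n base_k base_v il).1) base_k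
            (fun x hx1 hx2 => by simp only [pvA_7 n base_k base_v x hn]),
          pv_map_range_const (n - 2) n (fun il => (pvLayerA 7 n base_k base_v il).1) base_k
            (fun x hx1 hx2 => by simp only [pvA_7 n base_k base_v x hn]),
          if_pos hn, if_neg h1, if_neg h2, if_neg h5, if_neg h6, if_pos (by norm_num)]
      simp only [pvSetTo, pvSetFrom]
      rw [pv_take_repl2 "turbo2" "q8_0" n hn]
      have e0 : ((2 : Int) - 0).toNat = 2 := by omega
      have em : (n - 2 - 2).toNat = (n - 4).toNat := by omega
      have e1 : (n - (n - 2)).toNat = 2 := by omega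
      have hk : List.replicate 2 base_k ++ (List.replicate (n - 4).toNat base_k ++ List.replicate 2 base_k)
          = List.replicate n.toNat base_k := by
        rw [List.replicate_append_replicate, List.replicate_append_replicate]; congr 1; omega
      rw [e0, em, e1, hk]
      simp
    · rw [pv_map_range_const 0 n _ base_k
            (fun x _ _ => by simp only [pvA_def mode n base_k base_v x (Or.inr ⟨h1, h2, h5, h6, h7⟩)]),
          pv_map_range_const 0 n _ base_v
            (fun x _ _ => by simp only [pvA_def mode n base_k base_v x (Or.inr ⟨h1, h2, h5, h6, h7⟩)]),
          if_pos hn, if_neg h1, if_neg h2, if_neg h5, if_neg h6, if_neg h7]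
      norm_num
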